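-- pv_equiv track=rewrite | github.com/softspark/jira-mcp | scripts/validate_counts.py | count_cli_commands
-- ===== SOURCE A (Python) =====
-- def count_cli_commands(readme_text: str) -> int:
--     """Count CLI command rows in the README table (lines with | `jira-mcp)."""
--     in_section = False
--     count = 0
--     for line in readme_text.splitlines():
--         if line.strip() == "## CLI Commands":
--             in_section = True
--             continue
--         if in_section and line.startswith("## "):
--             break
--         if in_section and "| `jira-mcp" in line:
--             count += 1
--     return count
-- ===== SOURCE B (Python) =====
-- def count_cli_commands(readme_text: str) -> int:
--     """Count CLI command rows in the README table (lines with | `jira-mcp)."""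
--     lines = readme_text.splitlines()
--     try:
--         start = [line.strip() for line in lines].index("## CLI Commands") + 1
--     except ValueError:
--         return 0
--     section = lines[start:]
--     stops = [k for k, line in enumerate(section) if line.startswith("## ")]
--     if stops:
--         section = section[:stops[0]]
--     return sum("| `jira-mcp" in line for line in section)
-- ===== Notes on version B (the rewrite author's own statement) =====
-- stated objective: simpler
-- what changed: Replaced A's single-pass boolean state machine by a staged pipeline: strip-map + .index to locate the section header, a comprehension of stop indices to cut the section slice, and sum() of a boolean generator to count rows; Pre_ excludes texts with a duplicated '## CLI Commands' header line, an unspecified corner on which A merges both sections' rows while B counts only the first section — both readings are defensible.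
-- outside the precondition, e.g. on count_cli_commands('## CLI Commands\n| `jira-mcp a\n## CLI Commands\n| `jira-mcp b'): A returns 2, B returns 1
import Mathlib
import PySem

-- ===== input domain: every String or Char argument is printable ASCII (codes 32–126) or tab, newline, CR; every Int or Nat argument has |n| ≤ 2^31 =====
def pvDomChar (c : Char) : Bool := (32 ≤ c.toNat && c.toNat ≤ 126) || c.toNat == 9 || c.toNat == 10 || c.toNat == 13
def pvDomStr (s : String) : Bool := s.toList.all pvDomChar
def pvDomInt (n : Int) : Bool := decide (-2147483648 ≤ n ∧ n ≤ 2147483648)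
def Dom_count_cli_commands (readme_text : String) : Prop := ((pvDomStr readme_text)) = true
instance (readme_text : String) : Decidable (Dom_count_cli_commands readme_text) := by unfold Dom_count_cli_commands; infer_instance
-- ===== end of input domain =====

-- B replaces A's one-pass boolean state machine by a staged pipeline (strip-map + .index to
-- locate the header, a comprehension of stop indices to cut the section, sum of a boolean
-- generator to count); objective: simpler.

-- ===== PORT A =====
-- A's for-loop with state (in_section, count) and break, step for step.
def cliLoopA : List String → Bool → Int → Int
  | [], _, count => count
  | line :: rest, in_section, count =>
    if PySem.Str.strip line = "## CLI Commands" then cliLoopA rest true count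
    else if in_section && PySem.Str.startswith line "## " then count
    else if in_section && PySem.Str.isIn "| `jira-mcp" line then cliLoopA rest in_section (count + 1)
    else cliLoopA rest in_section count

def count_cli_commands (readme_text : String) : Int :=
  cliLoopA (PySem.Str.splitlines readme_text) false 0

-- ===== PORT B =====
-- stops = [k for k, line in enumerate(section) if line.startswith("## ")]
def bStops (sec : List String) : List Int :=
  ((PySem.List.enumerate sec).filter (fun p => PySem.Str.startswith p.2 "## ")).map Prod.fst

-- if stops: section = section[:stops[0]]
def bCut (sec : List String) : List String :=
  match bStops sec with
  | [] => sec
  | k :: _ => PySem.List.slice sec none (some k)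

-- sum("| `jira-mcp" in line for line in section)
def bSum (sec : List String) : Int :=
  ((bCut sec).map (fun line => if PySem.Str.isIn "| `jira-mcp" line then (1 : Int) else 0)).sum

def count_cli_commands_alt (readme_text : String) : Int :=
  let lines := PySem.Str.splitlines readme_text
  match PySem.List.index? (lines.map PySem.Str.strip) "## CLI Commands" with
  | none => 0                                                             -- except ValueError
  | some i => bSum (PySem.List.slice lines (some ((i : Int) + 1)) none)   -- lines[start:]

-- ===== PRECONDITION & SPEC =====
-- Pre_ excludes texts in which more than one line strips to '## CLI Commands': a duplicated
-- section header is an unspecified corner and both readings are defensible (A may merge the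
-- two sections' rows, B counts the first section only).
def Pre_count_cli_commands (readme_text : String) : Prop :=
  PySem.List.count ((PySem.Str.splitlines readme_text).map PySem.Str.strip) "## CLI Commands" ≤ 1
instance (readme_text : String) : Decidable (Pre_count_cli_commands readme_text) := by
  unfold Pre_count_cli_commands; infer_instance

def pvWitness_count_cli_commands : String :=
  "## CLI Commands\n| `jira-mcp run` | desc |\n## Next"

def Spec_count_cli_commands (readme_text : String) (out : Int) : Prop := out = count_cli_commands_alt readme_text
instance (readme_text : String) (out : Int) : Decidable (Spec_count_cli_commands readme_text out) := by unfold Spec_count_cli_commands; infer_instance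

-- ===== CLAIM (what is proved, stated in full; the proofs are below) =====
def Claim_equal_count_cli_commands : Prop := ∀ (readme_text : String), Dom_count_cli_commands readme_text → Pre_count_cli_commands readme_text → Spec_count_cli_commands readme_text (count_cli_commands readme_text)

-- ===== LEMMAS AND PROOFS =====

-- shifting the start index of enumerate
theorem enumerate_shift {α : Type} (xs : List α) (s : Int) :
    PySem.List.enumerate xs (s + 1) = (PySem.List.enumerate xs s).map (fun p => (p.1 + 1, p.2)) := by
  induction xs generalizing s with
  | nil => rfl
  | cons x rest ih =>
    simp only [PySem.List.enumerate_cons, List.map_cons]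
    rw [ih (s + 1)]

-- every stop index is nonnegative
theorem bStops_nonneg (sec : List String) : ∀ k ∈ bStops sec, 0 ≤ k := by
  intro k hk
  unfold bStops at hk
  simp only [List.mem_map, List.mem_filter] at hk
  obtain ⟨q, ⟨hq, _⟩, rfl⟩ := hk
  rcases (PySem.List.mem_enumerate_iff sec 0 q).1 hq with ⟨j, hj, rfl⟩
  simp

theorem bStops_cons (x : String) (rest : List String) :
    bStops (x :: rest) =
      (if PySem.Str.startswith x "## " then [(0 : Int)] else []) ++ (bStops rest).map (· + 1) := by
  unfold bStops
  rw [PySem.List.enumerate_cons, enumerate_shift rest 0]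
  by_cases h : PySem.Chars.startswith x.toList ['#', '#', ' '] <;>
    simp [h, List.filter_map, List.map_map, Function.comp_def]

theorem bCut_cons (x : String) (rest : List String) :
    bCut (x :: rest) = if PySem.Str.startswith x "## " then [] else x :: bCut rest := by
  unfold bCut
  rw [bStops_cons]
  by_cases h : PySem.Str.startswith x "## "
  · rw [if_pos h, if_pos h]
    show PySem.List.slice (x :: rest) none (some 0) = []
    rw [PySem.List.slice_to (x :: rest) (le_refl (0:Int))]
    simp
  · rw [if_neg h, if_neg h]
    cases hs : bStops rest with
    | nil => simp
    | cons k t =>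
      have hk : 0 ≤ k := bStops_nonneg rest k (by rw [hs]; exact List.mem_cons_self ..)
      simp only [List.map_cons, List.nil_append]
      show PySem.List.slice (x :: rest) none (some (k + 1)) = x :: PySem.List.slice rest none (some k)
      rw [PySem.List.slice_to (x :: rest) (by omega : (0:Int) ≤ k + 1), PySem.List.slice_to rest hk]
      have h1 : (k + 1).toNat = k.toNat + 1 := by omega
      rw [h1, List.take_succ_cons]

theorem bSum_nil : bSum [] = 0 := by
  simp [bSum, bCut, bStops, PySem.List.enumerate_nil]

theorem bSum_cons (x : String) (rest : List String) :
    bSum (x :: rest) =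
      if PySem.Str.startswith x "## " then 0
      else (if PySem.Str.isIn "| `jira-mcp" x then (1 : Int) else 0) + bSum rest := by
  unfold bSum
  rw [bCut_cons]
  by_cases h : PySem.Str.startswith x "## "
  · rw [if_pos h, if_pos h]; simp
  · rw [if_neg h, if_neg h]; simp

-- once in_section is true and no further line strips to the header, A's loop is B's count
theorem cliLoopA_true (sec : List String)
    (h : "## CLI Commands" ∉ sec.map PySem.Str.strip) (c : Int) :
    cliLoopA sec true c = c + bSum sec := by
  induction sec generalizing c with
  | nil => simp [cliLoopA, bSum_nil]
  | cons x rest ih =>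
    have hx : ¬ PySem.Str.strip x = "## CLI Commands" := fun hx => h (by simp [hx])
    have hrest : "## CLI Commands" ∉ rest.map PySem.Str.strip :=
      fun hm => h (List.mem_cons_of_mem _ hm)
    rw [show cliLoopA (x :: rest) true c =
        (if PySem.Str.strip x = "## CLI Commands" then cliLoopA rest true c
         else if PySem.Str.startswith x "## " then c
         else if PySem.Str.isIn "| `jira-mcp" x then cliLoopA rest true (c + 1)
         else cliLoopA rest true c) by rfl]
    rw [if_neg hx, bSum_cons]
    by_cases hb : PySem.Str.startswith x "## "
    · rw [if_pos hb, if_pos hb]; ring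
    · rw [if_neg hb, if_neg hb]
      by_cases hin : PySem.Str.isIn "| `jira-mcp" x
      · rw [if_pos hin, if_pos hin, ih hrest (c + 1)]; ring
      · rw [if_neg hin, if_neg hin, ih hrest c]; ring

-- the searching phase: A's loop with in_section = false against B's index?-based dispatch
theorem cliLoopA_false (ls : List String)
    (hpre : PySem.List.count (ls.map PySem.Str.strip) "## CLI Commands" ≤ 1) (c : Int) :
    cliLoopA ls false c =
      match PySem.List.index? (ls.map PySem.Str.strip) "## CLI Commands" with
      | none => c
      | some i => c + bSum (ls.drop (i + 1)) := by
  induction ls generalizing c with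
  | nil => rfl
  | cons x rest ih =>
    by_cases hx : PySem.Str.strip x = "## CLI Commands"
    · have hrest : "## CLI Commands" ∉ rest.map PySem.Str.strip := by
        rw [List.map_cons, hx] at hpre
        simp only [PySem.List.count, List.count_cons_self] at hpre
        intro hm
        have := List.count_pos_iff.2 hm
        omega
      rw [show cliLoopA (x :: rest) false c = cliLoopA rest true c by
        simp [cliLoopA, hx]]
      rw [cliLoopA_true rest hrest c]
      rw [List.map_cons, hx, PySem.List.index?_cons_self]
      simp
    · have hpre' : PySem.List.count (rest.map PySem.Str.strip) "## CLI Commands" ≤ 1 := by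
        simp only [List.map_cons, PySem.List.count, List.count_cons] at hpre ⊢
        split at hpre <;> omega
      rw [show cliLoopA (x :: rest) false c = cliLoopA rest false c by
        simp [cliLoopA, hx]]
      rw [ih hpre' c]
      rw [List.map_cons, PySem.List.index?_cons_of_ne (List.map PySem.Str.strip rest) hx]
      cases hidx : PySem.List.index? (rest.map PySem.Str.strip) "## CLI Commands" with
      | none => simp
      | some i => simp [List.drop_succ_cons]

-- ===== VERDICT (by name: the statement is the Claim_ definition above) =====
theorem count_cli_commands_spec : Claim_equal_count_cli_commands := by
  intro readme_text _ hpre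
  unfold Spec_count_cli_commands count_cli_commands count_cli_commands_alt
  rw [cliLoopA_false _ hpre 0]
  cases hidx : PySem.List.index? ((PySem.Str.splitlines readme_text).map PySem.Str.strip) "## CLI Commands" with
  | none =>
    rw [PySem.List.index?_eq_idxOf?] at hidx
    simp [hidx]
  | some i =>
    rw [PySem.List.index?_eq_idxOf?] at hidx
    have hsl : PySem.List.slice (PySem.Str.splitlines readme_text) (some ((i : Int) + 1)) none
        = (PySem.Str.splitlines readme_text).drop (i + 1) := by
      have := PySem.List.slice_from_natCast (PySem.Str.splitlines readme_text) (i + 1)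
      simpa using this
    simp [hidx, hsl]
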